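-- pv_equiv track=rewrite | github.com/Roby36/EDGAR_API | ealib.py | find_keys_containing_all_substrs
-- ===== SOURCE A (Python) =====
-- def find_keys_containing_all_substrs(dict, query_substrs) -> str:
--     """
--     Extension of function above.
--     Intended to identify metric by checking for all substrings containment
--     """
--     res = []
--     for key in dict.keys():
--         not_found = False
--         for qs in query_substrs:
--             if qs.lower() not in key.lower():
--                 not_found = True
--                 break
--         if not not_found:
--             res.append(key)
--     return res
-- ===== SOURCE B (Python) =====
-- def find_keys_containing_all_substrs(dict, query_substrs) -> str:
--     # B: progressive narrowing — start from all keys, filter once per query substring.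
--     res = list(dict.keys())
--     for qs in query_substrs:
--         q = qs.lower()
--         res = [k for k in res if q in k.lower()]
--     return res
-- ===== Notes on version B (the rewrite author's own statement) =====
-- stated objective: alternative
-- what changed: Transposed the nesting: instead of testing each key against all substrings with a break flag, B maintains a progressively narrowing candidate key list, filtering it once per query substring (and lowercases each substring once per pass instead of once per key).
import Mathlib
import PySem

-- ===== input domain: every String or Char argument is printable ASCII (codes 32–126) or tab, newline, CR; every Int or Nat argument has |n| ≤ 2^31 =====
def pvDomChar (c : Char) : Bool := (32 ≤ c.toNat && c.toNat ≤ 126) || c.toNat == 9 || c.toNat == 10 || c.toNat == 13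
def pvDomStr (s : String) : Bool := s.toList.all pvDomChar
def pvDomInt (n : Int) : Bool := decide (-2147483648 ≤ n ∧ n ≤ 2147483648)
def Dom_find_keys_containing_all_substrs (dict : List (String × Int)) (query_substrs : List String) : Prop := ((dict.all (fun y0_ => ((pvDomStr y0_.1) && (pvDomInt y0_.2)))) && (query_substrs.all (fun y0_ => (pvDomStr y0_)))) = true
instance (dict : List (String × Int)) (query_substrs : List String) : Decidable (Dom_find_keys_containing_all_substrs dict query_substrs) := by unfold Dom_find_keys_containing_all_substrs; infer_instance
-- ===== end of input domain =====

-- B transposes the nesting: instead of testing each key against all substrings with a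
-- break flag, it progressively narrows the candidate key list, one filter pass per
-- query substring (objective: alternative decomposition, same asymptotic cost).


-- ===== PORT A =====
-- the inner 'for qs in query_substrs' loop with its not_found flag and break
def pvNotFoundA (key : String) : List String → Bool
  | [] => false
  | qs :: rest =>
      if ¬ (PySem.Str.isIn (PySem.Str.lower qs) (PySem.Str.lower key)) then true
      else pvNotFoundA key rest

def find_keys_containing_all_substrs (dict : List (String × Int)) (query_substrs : List String) : List String :=
  dict.foldl (fun res kv =>
    if pvNotFoundA kv.1 query_substrs then res else res ++ [kv.1]) []

-- ===== PORT B =====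
def find_keys_containing_all_substrs_alt (dict : List (String × Int)) (query_substrs : List String) : List String :=
  query_substrs.foldl (fun res qs =>
    let q := PySem.Str.lower qs
    res.filter (fun k => PySem.Str.isIn q (PySem.Str.lower k))) (dict.map Prod.fst)

-- ===== PRECONDITION & SPEC =====
def Spec_find_keys_containing_all_substrs (dict : List (String × Int)) (query_substrs : List String) (out : List String) : Prop := out = find_keys_containing_all_substrs_alt dict query_substrs
instance (dict : List (String × Int)) (query_substrs : List String) (out : List String) : Decidable (Spec_find_keys_containing_all_substrs dict query_substrs out) := by unfold Spec_find_keys_containing_all_substrs; infer_instance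

-- ===== CLAIM (what is proved, stated in full; the proofs are below) =====
def Claim_equal_find_keys_containing_all_substrs : Prop := ∀ (dict : List (String × Int)) (query_substrs : List String), Dom_find_keys_containing_all_substrs dict query_substrs → Spec_find_keys_containing_all_substrs dict query_substrs (find_keys_containing_all_substrs dict query_substrs)

-- ===== LEMMAS AND PROOFS =====

def pvOk (qss : List String) (k : String) : Bool :=
  qss.all (fun qs => PySem.Str.isIn (PySem.Str.lower qs) (PySem.Str.lower k))

theorem pvNotFoundA_eq (key : String) (qss : List String) :
    pvNotFoundA key qss = !(pvOk qss key) := by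
  induction qss with
  | nil => rfl
  | cons q rest ih => simp [pvNotFoundA, pvOk, ih, List.all_cons]

theorem portA_eq_filter (qss : List String) (dict : List (String × Int)) (acc : List String) :
    dict.foldl (fun res kv =>
      if pvNotFoundA kv.1 qss then res else res ++ [kv.1]) acc
    = acc ++ (dict.map Prod.fst).filter (pvOk qss) := by
  induction dict generalizing acc with
  | nil => simp
  | cons kv rest ih =>
      simp only [List.foldl_cons, List.map_cons, List.filter_cons]
      by_cases h : pvOk qss kv.1 = true
      · have hnf : pvNotFoundA kv.1 qss = false := by rw [pvNotFoundA_eq, h]; rfl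
        rw [hnf]
        simp [h, ih]
      · have hnf : pvNotFoundA kv.1 qss = true := by
          rw [pvNotFoundA_eq, Bool.eq_false_iff.mpr h]; rfl
        rw [hnf]
        simp [Bool.eq_false_iff.mpr h, ih]

theorem portB_eq_filter (qss : List String) (l : List String) :
    qss.foldl (fun res qs =>
      let q := PySem.Str.lower qs
      res.filter (fun k => PySem.Str.isIn q (PySem.Str.lower k))) l
    = l.filter (pvOk qss) := by
  induction qss generalizing l with
  | nil =>
      simp only [List.foldl_nil]
      exact (List.filter_eq_self.mpr (fun a _ => by simp [pvOk])).symm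
  | cons q rest ih =>
      simp only [List.foldl_cons, ih, List.filter_filter]
      congr 1
      funext k
      simp [pvOk, List.all_cons, Bool.and_comm]

-- ===== VERDICT (by name: the statement is the Claim_ definition above) =====
theorem find_keys_containing_all_substrs_spec : Claim_equal_find_keys_containing_all_substrs := by
  intro dict qss _
  unfold Spec_find_keys_containing_all_substrs
  unfold find_keys_containing_all_substrs find_keys_containing_all_substrs_alt
  rw [portA_eq_filter, portB_eq_filter]
  simp
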